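-- pv_equiv track=rewrite | github.com/ark2016/VK-Technopark-project-2024 | data_mining/tests/functions/file_841_860.py | find_repeated_chars
-- ===== SOURCE A (Python) =====
-- def find_repeated_chars(s):
--     count = {}
--     repeated = ''
--     for char in s:
--         if char.isalpha():
--             count[char] = count.get(char, 0) + 1
--     for char, cnt in count.items():
--         if cnt > 1:
--             repeated += char
--     return repeated if repeated else None
-- ===== SOURCE B (Python) =====
-- def find_repeated_chars(s):
--     letters = [c for c in s if c.isalpha()]
--     seen = set()
--     result = ''
--     for c in letters:
--         if c not in seen:
--             if letters.count(c) > 1: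
--                 result += c
--             seen.add(c)
--     return result if result else None
-- ===== Notes on version B (the rewrite author's own statement) =====
-- stated objective: alternative
-- what changed: Replaces A's frequency-dict build followed by an items() filter pass with a single scan over the pre-extracted letters list that uses a seen set and letters.count(c) to emit each repeated letter at its first occurrence.
import Mathlib
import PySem

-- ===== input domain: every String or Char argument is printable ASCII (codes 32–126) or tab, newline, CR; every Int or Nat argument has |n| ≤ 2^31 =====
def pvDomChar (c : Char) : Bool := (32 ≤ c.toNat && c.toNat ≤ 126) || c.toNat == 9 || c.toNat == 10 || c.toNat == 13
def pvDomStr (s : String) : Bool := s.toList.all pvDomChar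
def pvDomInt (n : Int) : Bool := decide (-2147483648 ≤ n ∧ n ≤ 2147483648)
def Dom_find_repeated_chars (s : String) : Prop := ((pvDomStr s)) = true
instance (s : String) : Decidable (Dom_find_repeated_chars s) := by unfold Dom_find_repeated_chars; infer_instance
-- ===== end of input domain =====

-- B replaces A's frequency-dict pass with a letters list, a seen set and letters.count;
-- same output (repeated letters in first-occurrence order, None if none), alternative structure.

-- ===== PORT A =====
def find_repeated_chars (s : String) : Option String :=
  let count : PySem.Dict Char Int :=
    s.toList.foldl
      (fun d c => if PySem.Chars.isalpha c then d.insert c (d.getD c 0 + 1) else d)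
      PySem.Dict.empty
  let repeated : List Char :=
    count.items.foldl (fun r kv => if kv.2 > 1 then r ++ [kv.1] else r) []
  if repeated.isEmpty then none else some (String.ofList repeated)

-- ===== PORT B =====
def find_repeated_chars_alt (s : String) : Option String :=
  let letters := s.toList.filter (fun c => PySem.Chars.isalpha c)
  let st :=
    letters.foldl
      (fun (acc : List Char × PySem.Set Char) c =>
        if PySem.Set.contains acc.2 c then acc
        else ((if letters.count c > 1 then acc.1 ++ [c] else acc.1), PySem.Set.add acc.2 c))
      ([], PySem.Set.empty)
  if st.1.isEmpty then none else some (String.ofList st.1)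

-- ===== PRECONDITION & SPEC =====
def Spec_find_repeated_chars (s : String) (out : Option String) : Prop := out = find_repeated_chars_alt s
instance (s : String) (out : Option String) : Decidable (Spec_find_repeated_chars s out) := by unfold Spec_find_repeated_chars; infer_instance

-- ===== CLAIM (what is proved, stated in full; the proofs are below) =====
def Claim_equal_find_repeated_chars : Prop := ∀ (s : String), Dom_find_repeated_chars s → Spec_find_repeated_chars s (find_repeated_chars s)

-- ===== LEMMAS AND PROOFS =====

/-- The new (not-yet-seen) elements of `l` relative to `seen`, in order. -/
def newOf (seen : PySem.Set Char) : List Char → List Char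
  | [] => []
  | c :: l => if PySem.Set.contains seen c then newOf seen l
              else c :: newOf (PySem.Set.add seen c) l

theorem update_eq_append_newOf (l : List Char) : ∀ (seen : PySem.Set Char),
    PySem.Set.update seen l = seen ++ newOf seen l := by
  induction l with
  | nil => intro seen; simp [newOf, PySem.Set.update]
  | cons c l ih =>
    intro seen
    rw [PySem.Set.update_cons, ih, newOf]
    by_cases h : c ∈ seen
    · simp [PySem.Set.add, h]
    · simp [PySem.Set.add, h]

theorem loopB (p : Char → Prop) [DecidablePred p] (l : List Char) :
    ∀ (res : List Char) (seen : PySem.Set Char),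
    (l.foldl
      (fun (acc : List Char × PySem.Set Char) c =>
        if PySem.Set.contains acc.2 c then acc
        else ((if p c then acc.1 ++ [c] else acc.1), PySem.Set.add acc.2 c))
      (res, seen)).1 = res ++ (newOf seen l).filter (fun c => decide (p c)) := by
  induction l with
  | nil => intro res seen; simp [newOf]
  | cons c l ih =>
    intro res seen
    by_cases h : PySem.Set.contains seen c
    · rw [newOf, if_pos h, List.foldl_cons, if_pos h, ih]
    · rw [newOf, if_neg h, List.foldl_cons, if_neg h]
      by_cases hp : p c
      · rw [if_pos hp, ih]
        simp [hp]
      · rw [if_neg hp, ih]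
        simp [hp]

-- ===== VERDICT (by name: the statement is the Claim_ definition above) =====
theorem find_repeated_chars_spec : Claim_equal_find_repeated_chars := by
  intro s _
  unfold Spec_find_repeated_chars find_repeated_chars find_repeated_chars_alt
  dsimp only
  set letters := s.toList.filter (fun c => PySem.Chars.isalpha c) with hl
  have hA : s.toList.foldl
      (fun (d : PySem.Dict Char Int) c =>
        if PySem.Chars.isalpha c then d.insert c (d.getD c 0 + 1) else d)
      PySem.Dict.empty = PySem.Dict.counter letters := by
    rw [PySem.List.foldl_if_eq_foldl_filter, ← hl,
      PySem.Dict.foldl_insert_getD_add_one_eq_counter]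
  rw [hA, loopB (fun c => letters.count c > 1)]
  have hnew : newOf PySem.Set.empty letters = PySem.Set.ofList letters := by
    have := update_eq_append_newOf letters PySem.Set.empty
    simpa [PySem.Set.update, PySem.Set.ofList_eq_foldl, PySem.Set.empty] using this.symm
  rw [PySem.Dict.items_counter, List.foldl_map, hnew, List.nil_append]
  have hAr : List.foldl
      (fun (r : List Char) k =>
        if ((k, (letters.count k : Int)) : Char × Int).2 > 1 then r ++ [((k, (letters.count k : Int)) : Char × Int).1] else r)
      [] (PySem.Set.ofList letters)
      = [] ++ (PySem.Set.ofList letters).filter (fun k => decide ((letters.count k : Int) > 1)) := by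
    exact PySem.List.foldl_append_ite_eq_filter (fun k => ((letters.count k : Int) > 1)) _ _
  dsimp only at hAr
  rw [hAr, List.nil_append]
  have hfilter : (PySem.Set.ofList letters).filter (fun k => decide ((letters.count k : Int) > 1))
      = (PySem.Set.ofList letters).filter (fun c => decide (letters.count c > 1)) := by
    apply List.filter_congr
    intro x _
    simp only [gt_iff_lt, decide_eq_decide]
    exact_mod_cast Iff.rfl
  rw [hfilter]
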